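-- pv_equiv track=rewrite | github.com/Krythz43/SolveNext-Codeforces | app.py | filter_problems_by_tags
-- ===== SOURCE A (Python) =====
-- def filter_problems_by_tags(problems,tags):
--
--     required_list=[]
--
--     for problem in problems:
--         for tag in tags:
--             if tag in problem["tags"]:
--                 required_list.append(problem)
--                 break
--
--     return required_list
-- ===== SOURCE B (Python) =====
-- def filter_problems_by_tags(problems, tags):
--     # Inverted traversal: loop over tags OUTER, mark a boolean mask over problems,
--     # then emit the marked problems in one final pass (order preserved, each at most once).
--     keep = [False] * len(problems)
--     for tag in tags:
--         for i, problem in enumerate(problems):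
--             if tag in problem["tags"]:
--                 keep[i] = True
--     return [p for p, k in zip(problems, keep) if k]
-- ===== Notes on version B (the rewrite author's own statement) =====
-- stated objective: alternative
-- what changed: Swaps the loop nesting (tags outer, problems inner) and replaces append-with-break by a staged algorithm: a boolean mask over the problems is marked across all tag passes, and a final zip pass emits the marked problems in order.
import Mathlib
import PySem

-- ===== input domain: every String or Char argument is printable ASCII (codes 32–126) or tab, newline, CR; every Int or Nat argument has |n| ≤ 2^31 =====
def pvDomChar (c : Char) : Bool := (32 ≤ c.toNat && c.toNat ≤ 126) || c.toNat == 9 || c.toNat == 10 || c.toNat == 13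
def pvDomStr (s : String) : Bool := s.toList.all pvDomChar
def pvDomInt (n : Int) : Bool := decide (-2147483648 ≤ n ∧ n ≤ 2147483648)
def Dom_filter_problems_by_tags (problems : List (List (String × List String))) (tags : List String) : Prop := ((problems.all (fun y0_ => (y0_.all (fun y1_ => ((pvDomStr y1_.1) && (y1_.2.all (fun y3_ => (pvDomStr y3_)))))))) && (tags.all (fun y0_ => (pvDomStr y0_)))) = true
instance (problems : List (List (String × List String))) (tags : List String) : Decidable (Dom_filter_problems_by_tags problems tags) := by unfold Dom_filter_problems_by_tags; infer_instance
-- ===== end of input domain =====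

-- B swaps the loop nesting (tags outer, problems inner) and works in stages: a boolean mask over
-- the problems is marked across the tag passes, then one final zip pass emits the marked problems.

-- ===== PORT A =====
-- inner 'for tag in tags: if tag in problem["tags"]: …; break' — did any tag match?
def pvAInner (problem : List (String × List String)) (tags : List String) : Bool :=
  tags.any (fun tag =>
    match List.lookup "tags" problem with   -- dict lookup = first match in the assoc list
    | some ts => ts.contains tag
    | none => false)   -- KeyError in Python; excluded by Pre_

def filter_problems_by_tags (problems : List (List (String × List String))) (tags : List String) : List (List (String × List String)) :=
  problems.foldl (fun required_list problem =>
    if pvAInner problem tags then required_list ++ [problem] else required_list) []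

-- ===== PORT B =====
def pvBTags (p : List (String × List String)) : List String :=
  (List.lookup "tags" p).getD []   -- p["tags"]; the none case is a KeyError, excluded by Pre_

def filter_problems_by_tags_alt (problems : List (List (String × List String))) (tags : List String) : List (List (String × List String)) :=
  let keep : List Bool := tags.foldl (fun keep tag =>
      -- 'for i, problem in enumerate(problems): if tag in problem["tags"]: keep[i] = True'
      List.zipWith (fun k p => if (pvBTags p).contains tag then true else k) keep problems)
    (List.replicate problems.length false)
  ((problems.zip keep).filter (fun pk => pk.2)).map Prod.fst

-- ===== PRECONDITION & SPEC =====
-- Pre_ excludes exactly the KeyError inputs: tags non-empty and some problem without a "tags" key.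
def Pre_filter_problems_by_tags (problems : List (List (String × List String))) (tags : List String) : Prop :=
  tags = [] ∨ ∀ p ∈ problems, (List.lookup "tags" p).isSome = true
instance (problems : List (List (String × List String))) (tags : List String) : Decidable (Pre_filter_problems_by_tags problems tags) := by unfold Pre_filter_problems_by_tags; infer_instance

def pvWitness_filter_problems_by_tags : (List (List (String × List String))) × List String :=
  ([[("tags", ["dp", "math"])], [("tags", ["graphs"])]], ["math"])

def Spec_filter_problems_by_tags (problems : List (List (String × List String))) (tags : List String) (out : List (List (String × List String))) : Prop := out = filter_problems_by_tags_alt problems tags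
instance (problems : List (List (String × List String))) (tags : List String) (out : List (List (String × List String))) : Decidable (Spec_filter_problems_by_tags problems tags out) := by unfold Spec_filter_problems_by_tags; infer_instance

-- ===== CLAIM (what is proved, stated in full; the proofs are below) =====
def Claim_equal_filter_problems_by_tags : Prop := ∀ (problems : List (List (String × List String))) (tags : List String), Dom_filter_problems_by_tags problems tags → Pre_filter_problems_by_tags problems tags → Spec_filter_problems_by_tags problems tags (filter_problems_by_tags problems tags)

-- ===== LEMMAS AND PROOFS =====

-- one mask pass over 'ps.map g' is again a map
lemma zipWith_map_self {α β : Type} (f : β → α → β) (g : α → β) (ps : List α) :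
    List.zipWith f (ps.map g) ps = ps.map (fun p => f (g p) p) := by
  induction ps with
  | nil => rfl
  | cons a l ih => simp [ih]

-- the whole tag fold turns the mask 'ps.map g' into a map recording 'some tag matched or old bit'
lemma mask_fold (tags : List String) (ps : List (List (String × List String)))
    (g : List (String × List String) → Bool) :
    tags.foldl (fun keep tag =>
      List.zipWith (fun k p => if (pvBTags p).contains tag then true else k) keep ps) (ps.map g)
    = ps.map (fun p => (tags.any (fun t => (pvBTags p).contains t)) || g p) := by
  induction tags generalizing g with
  | nil => simp
  | cons t rest ih =>
    simp only [List.foldl_cons, zipWith_map_self]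
    rw [ih]
    apply List.map_congr_left
    intro p _
    rw [List.any_cons]
    cases h : (pvBTags p).contains t <;>
      cases rest.any (fun t => (pvBTags p).contains t) <;> cases g p <;> simp

-- the final zip pass over a mask that is a map of the list itself is a plain filter
lemma zip_map_filter {α : Type} (ps : List α) (c : α → Bool) :
    ((ps.zip (ps.map c)).filter (fun pk => pk.2)).map Prod.fst = ps.filter c := by
  induction ps with
  | nil => rfl
  | cons a l ih => cases h : c a <;> simp [List.filter, h, ih]

-- ===== VERDICT (by name: the statement is the Claim_ definition above) =====
theorem filter_problems_by_tags_spec : Claim_equal_filter_problems_by_tags := by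
  intro problems tags _ hpre
  unfold Spec_filter_problems_by_tags filter_problems_by_tags filter_problems_by_tags_alt
  rw [PySem.List.foldl_append_if_eq_filter, List.nil_append]
  have hrep : List.replicate problems.length false
      = problems.map (fun _ => false) := by simp
  rw [hrep, mask_fold, zip_map_filter]
  apply List.filter_congr
  intro p hp
  rcases hpre with rfl | hkeys
  · simp [pvAInner]
  · obtain ⟨ts, hts⟩ := Option.isSome_iff_exists.mp (hkeys p hp)
    simp [pvAInner, pvBTags, hts]
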